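-- pv_equiv track=rewrite | github.com/shiyutang/DL-Prep | 04_Algorithms/Leetcode/Collecting Gold.py | kiloinId
-- ===== SOURCE A (Python) =====
-- def kiloinId(Id):
--     def eratosthenes(n):
--         IsPrime = [True] * (n + 1)
--         for i in range(2, int(n ** 0.5) + 1):
--             if IsPrime[i]:
--                 for j in range(i * i, n + 1, i):
--                     IsPrime[j] = False
--         return [x for x in range(2, n + 1) if IsPrime[x]]
--
--     res,kilo = 1,0
--     for item in eratosthenes(54):
--         res *=item
--         if res<=Id:
--             kilo += 1
--     return kilo
-- ===== SOURCE B (Python) =====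
-- def kiloinId(Id):
--     # primes up to 54 by trial division (instead of a sieve)
--     primes = [n for n in range(2, 55)
--               if all(n % d for d in range(2, int(n ** 0.5) + 1))]
--     prods = []
--     r = 1
--     for p in primes:
--         r *= p
--         prods.append(r)
--     return sum(1 for x in prods if x <= Id)
-- ===== Notes on version B (the rewrite author's own statement) =====
-- stated objective: alternative
-- what changed: Replaces the Sieve of Eratosthenes with a trial-division prime generator, and replaces the running multiply-and-count loop with building the list of prefix products and counting those that are <= Id.
import Mathlib
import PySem

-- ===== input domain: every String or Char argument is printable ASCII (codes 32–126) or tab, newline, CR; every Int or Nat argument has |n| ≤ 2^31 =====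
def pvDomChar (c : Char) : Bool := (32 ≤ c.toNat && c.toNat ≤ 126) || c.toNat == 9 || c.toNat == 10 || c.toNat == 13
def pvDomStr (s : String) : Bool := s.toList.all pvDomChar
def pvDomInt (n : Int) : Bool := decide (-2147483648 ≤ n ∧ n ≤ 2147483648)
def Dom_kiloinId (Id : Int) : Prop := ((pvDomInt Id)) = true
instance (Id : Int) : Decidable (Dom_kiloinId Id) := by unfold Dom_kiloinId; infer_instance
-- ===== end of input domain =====

-- B replaces A's Sieve of Eratosthenes by trial division and the running
-- multiply-and-count loop by counting the prefix products ≤ Id (alternative, same cost).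

-- ===== PORT A =====
-- int(n ** 0.5): exact integer sqrt (largest k with k*k ≤ n); agrees with Python's float
-- expression on every argument it is applied to here (n ≤ 54, where the float sqrt is exact).
def pvISqrt (n : Nat) : Nat := (List.range (n + 1)).foldl (fun a k => if k * k ≤ n then k else a) 0

def eratosthenes (n : Int) : List Int :=
  let isPrime0 : List Bool := List.replicate (n.toNat + 1) true
  let isPrime :=
    (PySem.List.pyRange 2 ((pvISqrt n.toNat : Int) + 1) 1).foldl
      (fun isP i =>
        if isP.getD i.toNat false then
          -- indices j are nonnegative here, so .toNat is exact
          (PySem.List.pyRange (i * i) (n + 1) i).foldl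
            (fun isP2 j => isP2.set j.toNat false) isP
        else isP) isPrime0
  (PySem.List.pyRange 2 (n + 1) 1).filter (fun x => isPrime.getD x.toNat false)

def kiloinId (Id : Int) : Int :=
  ((eratosthenes 54).foldl
    (fun (st : Int × Int) item =>
      (st.1 * item, if st.1 * item ≤ Id then st.2 + 1 else st.2)) (1, 0)).2

-- ===== PORT B =====
-- int(n ** 0.5): same exact integer sqrt as above (exact on the range 2..54 used here).
def pvPrimesTD : List Int :=
  (PySem.List.pyRange 2 55 1).filter (fun nn =>
    (PySem.List.pyRange 2 ((pvISqrt nn.toNat : Int) + 1) 1).all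
      (fun d => decide (PySem.Int.mod nn d ≠ 0)))

def kiloinId_alt (Id : Int) : Int :=
  ((pvPrimesTD.foldl
    (fun (st : Int × List Int) p => (st.1 * p, st.2 ++ [st.1 * p])) (1, [])).2.countP
      (fun x => x ≤ Id) : Int)

-- ===== PRECONDITION & SPEC =====
def Spec_kiloinId (Id : Int) (out : Int) : Prop := out = kiloinId_alt Id
instance (Id : Int) (out : Int) : Decidable (Spec_kiloinId Id out) := by unfold Spec_kiloinId; infer_instance

-- ===== CLAIM (what is proved, stated in full; the proofs are below) =====
def Claim_equal_kiloinId : Prop := ∀ (Id : Int), Dom_kiloinId Id → Spec_kiloinId Id (kiloinId Id)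

-- ===== LEMMAS AND PROOFS =====

-- the two prime generators produce the same literal list
theorem pv_primes_eq : eratosthenes 54 = pvPrimesTD := by decide

-- prefix products of l starting from r
def pvScan (r : Int) : List Int → List Int
  | [] => []
  | p :: l => (r * p) :: pvScan (r * p) l

theorem pv_prods_fold (l : List Int) (r : Int) (acc : List Int) :
    (l.foldl (fun (st : Int × List Int) p => (st.1 * p, st.2 ++ [st.1 * p])) (r, acc)).2
      = acc ++ pvScan r l := by
  induction l generalizing r acc with
  | nil => simp [pvScan]
  | cons p l ih => simp [List.foldl, pvScan, ih, List.append_assoc]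

theorem pv_count_fold (Id : Int) (l : List Int) (r k : Int) :
    (l.foldl (fun (st : Int × Int) item =>
        (st.1 * item, if st.1 * item ≤ Id then st.2 + 1 else st.2)) (r, k)).2
      = k + ((pvScan r l).countP (fun x => decide (x ≤ Id)) : Int) := by
  induction l generalizing r k with
  | nil => simp [pvScan]
  | cons p l ih =>
    simp only [List.foldl, pvScan, List.countP_cons, ih]
    by_cases h : r * p ≤ Id <;> simp [h] <;> omega

-- ===== VERDICT (by name: the statement is the Claim_ definition above) =====
theorem kiloinId_spec : Claim_equal_kiloinId := by
  intro Id _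
  unfold Spec_kiloinId kiloinId kiloinId_alt
  rw [pv_primes_eq, pv_prods_fold, pv_count_fold]
  simp
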